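-- pv_equiv track=rewrite | github.com/MrJack100/wordsNumbers | oldPi.py | splitNumber
-- ===== SOURCE A (Python) =====
-- def splitNumber(number):
--     number = [item for item in number]
--     number.reverse()
--     groups = []
--     digit = 0
--     # Split number into groups of 3
--     for _ in number:
--         try:
--             groups.append([number[digit] + number[digit + 1] + number[digit + 2]])
--         except IndexError:
--             try:
--                 groups.append([number[digit] + number[digit + 1]])
--             except IndexError:
--                 try:
--                     groups.append([number[digit]])
--                 except IndexError:
--                     pass
--         digit = digit + 3
--     # Reverse every digit in the group
--     correctedGroups = []
--     for group in groups:
--         newGroup = []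
--         for _ in group:
--             for digit in _:
--                 newGroup.append(digit)
--         newGroup.reverse()
--         newGroup = "".join(newGroup)
--         correctedGroups.append(newGroup)
--     # Reverse corrected groups
--     correctedGroups.reverse()
--     return(correctedGroups)
-- ===== SOURCE B (Python) =====
-- def splitNumber(number):
--     groups = []
--     n = len(number)
--     i = 0
--     while i < n:
--         k = (n - i) % 3 or 3
--         groups.append(number[i:i + k])
--         i += k
--     return groups
-- ===== Notes on version B (the rewrite author's own statement) =====
-- stated objective: faster
-- what changed: A reverses the string, collects 3-char groups via an indexed try/except cascade, then reverses each group and the group list; B is a single forward index loop peeling the chunk of size (n-i)%3 or 3, with no reversals and no exception handling.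
import Mathlib
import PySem

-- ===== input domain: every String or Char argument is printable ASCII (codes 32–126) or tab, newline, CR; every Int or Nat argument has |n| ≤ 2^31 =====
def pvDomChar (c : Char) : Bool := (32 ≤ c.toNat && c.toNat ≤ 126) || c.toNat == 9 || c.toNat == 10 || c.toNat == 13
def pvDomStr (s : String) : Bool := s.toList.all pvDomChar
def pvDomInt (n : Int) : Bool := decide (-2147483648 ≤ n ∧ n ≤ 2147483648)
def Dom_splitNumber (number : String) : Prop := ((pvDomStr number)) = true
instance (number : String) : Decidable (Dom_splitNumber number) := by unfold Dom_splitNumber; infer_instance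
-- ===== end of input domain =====

-- B replaces A's reverse/try-except/index machinery by one forward index loop peeling chunks (objective: faster by constant factor, measured).

-- ===== PORT A =====
def splitNumber (number : String) : List String :=
  -- number = [item for item in number]; number.reverse()
  let cs := number.toList.reverse
  -- for _ in number: try/except cascade, digit += 3
  let loop := cs.foldl (fun (st : List (List (List Char)) × Int) _ =>
      match PySem.List.pyGet? cs st.2, PySem.List.pyGet? cs (st.2 + 1), PySem.List.pyGet? cs (st.2 + 2) with
      | some a, some b, some c => (st.1 ++ [[[a, b, c]]], st.2 + 3)
      | some a, some b, none   => (st.1 ++ [[[a, b]]], st.2 + 3)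
      | some a, none,   _      => (st.1 ++ [[[a]]], st.2 + 3)
      | none,   _,      _      => (st.1, st.2 + 3)) ([], 0)
  -- for group in groups: flatten chars, reverse, join
  let corrected := loop.1.foldl (fun acc group =>
      let newGroup := group.foldl (fun ng s => s.foldl (fun n2 d => n2 ++ [d]) ng) []
      acc ++ [String.ofList newGroup.reverse]) ([] : List String)
  -- correctedGroups.reverse()
  corrected.reverse

-- ===== PORT B =====
-- helper = B's while loop: peel number[i:i+k] with k = (n-i)%3 or 3, advance i
def sn_loop (cs : List Char) (n : Int) (groups : List String) (i : Int) : List String :=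
  if i < n then
    let k : Int := if PySem.Int.mod (n - i) 3 = 0 then 3 else PySem.Int.mod (n - i) 3
    sn_loop cs n (groups ++ [String.ofList (PySem.List.slice cs (some i) (some (i + k)))]) (i + k)
  else groups
termination_by (n - i).toNat
decreasing_by
  rename_i hlt
  have h0 : 0 ≤ PySem.Int.mod (n - i) 3 := PySem.Int.mod_nonneg _ (by omega)
  have h3 : PySem.Int.mod (n - i) 3 < 3 := PySem.Int.mod_lt _ (by omega)
  split <;> omega

def splitNumber_alt (number : String) : List String :=
  sn_loop number.toList number.toList.length [] 0

-- ===== PRECONDITION & SPEC =====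
def Spec_splitNumber (number : String) (out : List String) : Prop := out = splitNumber_alt number
instance (number : String) (out : List String) : Decidable (Spec_splitNumber number out) := by unfold Spec_splitNumber; infer_instance

-- ===== CLAIM (what is proved, stated in full; the proofs are below) =====
def Claim_equal_splitNumber : Prop := ∀ (number : String), Dom_splitNumber number → Spec_splitNumber number (splitNumber number)

-- ===== LEMMAS AND PROOFS =====

-- chunks of 3 taken from the front, shorter last chunk
def g3 {α : Type} : List α → List (List α)
  | a :: b :: c :: t => [a, b, c] :: g3 t
  | [a, b] => [[a, b]]
  | [a] => [[a]]
  | [] => []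

-- the common characterisation of both programs' chunk lists
def specL (cs : List Char) : List (List Char) :=
  ((g3 cs.reverse).map List.reverse).reverse

theorem g3_append {α : Type} (ys zs : List α) (h : ys.length % 3 = 0) :
    g3 (ys ++ zs) = g3 ys ++ g3 zs := by
  fun_induction g3 ys with
  | case1 a b c t ih =>
    have ht : t.length % 3 = 0 := by simp at h; omega
    simp [g3, ih ht]
  | case2 a b => simp at h
  | case3 a => simp at h
  | case4 => rfl

theorem g3_small {α : Type} (cs : List α) (h0 : cs ≠ []) (h3 : cs.length ≤ 3) :
    g3 cs = [cs] := by
  match cs with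
  | [a] => rfl
  | [a, b] => rfl
  | [a, b, c] => rfl
  | [] => exact absurd rfl h0
  | a :: b :: c :: d :: t => exact absurd h3 (by simp)

theorem specL_cons (cs : List Char) (hnil : cs ≠ [])
    (kn : Nat) (hk : kn = if cs.length % 3 = 0 then 3 else cs.length % 3) :
    specL cs = cs.take kn :: specL (cs.drop kn) := by
  have hn : cs.length ≠ 0 := by simpa [List.length_eq_zero_iff] using hnil
  have hr : cs.length % 3 < 3 := Nat.mod_lt _ (by omega)
  have hk0 : 0 < kn := by rw [hk]; split <;> omega
  have hk3 : kn ≤ 3 := by rw [hk]; split <;> omega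
  have hkn : kn ≤ cs.length := by rw [hk]; split <;> omega
  have hdm : (cs.length - kn) % 3 = 0 := by rw [hk]; split <;> omega
  have hsplit : cs.reverse = (cs.drop kn).reverse ++ (cs.take kn).reverse := by
    rw [← List.reverse_append, List.take_append_drop]
  have hdl : (cs.drop kn).reverse.length % 3 = 0 := by
    simp [List.length_drop]; omega
  have hlt : (cs.take kn).length = kn := by rw [List.length_take]; omega
  have htk : g3 (cs.take kn).reverse = [(cs.take kn).reverse] := by
    apply g3_small
    · intro hcon
      have := congrArg List.length hcon
      simp [hlt] at this
      omega
    · simp [hlt]; omega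
  unfold specL
  rw [hsplit, g3_append _ _ hdl, htk]
  simp

theorem loopB (cs : List Char) (fuel : Nat) :
    ∀ (i : Nat), cs.length - i ≤ fuel → i ≤ cs.length → ∀ (groups : List String),
    sn_loop cs (cs.length : Int) groups (i : Int)
      = groups ++ (specL (cs.drop i)).map String.ofList := by
  induction fuel with
  | zero =>
    intro i hf hi groups
    have hieq : i = cs.length := by omega
    rw [sn_loop]
    simp [hieq, specL, g3]
  | succ f ih =>
    intro i hf hi groups
    by_cases hlt : i < cs.length
    · have hmod : PySem.Int.mod ((cs.length : Int) - (i : Int)) 3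
          = (((cs.length - i) % 3 : Nat) : Int) := by
        rw [show ((cs.length : Int) - (i : Int)) = ((cs.length - i : Nat) : Int) by omega]
        exact_mod_cast PySem.Int.mod_natCast (cs.length - i) 3
      set kn : Nat := if (cs.length - i) % 3 = 0 then 3 else (cs.length - i) % 3 with hkdef
      have hkmod : (cs.length - i) % 3 < 3 := Nat.mod_lt _ (by omega)
      have hk0 : 0 < kn := by rw [hkdef]; split <;> omega
      have hk3 : kn ≤ 3 := by rw [hkdef]; split <;> omega
      have hkle : kn ≤ cs.length - i := by rw [hkdef]; split <;> omega
      have hkInt : (if PySem.Int.mod ((cs.length : Int) - (i : Int)) 3 = 0 then (3 : Int)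
          else PySem.Int.mod ((cs.length : Int) - (i : Int)) 3) = (kn : Int) := by
        rw [hmod, hkdef]
        split
        · rename_i hz
          have : (cs.length - i) % 3 = 0 := by exact_mod_cast hz
          simp [this]
        · rename_i hz
          have : ¬ (cs.length - i) % 3 = 0 := by
            intro hc; exact hz (by exact_mod_cast congrArg (Nat.cast : Nat → Int) hc)
          simp [this]
      have hslice : PySem.List.slice cs (some (i : Int)) (some ((i : Int) + (kn : Int)))
          = (cs.drop i).take kn := PySem.List.slice_natCast_add cs i kn
      have hcons : specL (cs.drop i) = (cs.drop i).take kn :: specL ((cs.drop i).drop kn) := by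
        apply specL_cons
        · intro hcon
          have := congrArg List.length hcon
          simp [List.length_drop] at this
          omega
        · rw [hkdef, List.length_drop]
      rw [sn_loop]
      rw [if_pos (by exact_mod_cast hlt)]
      simp only [hkInt, hslice]
      rw [show ((i : Int) + (kn : Int)) = ((i + kn : Nat) : Int) by push_cast; ring]
      rw [ih (i + kn) (by omega) (by omega)]
      rw [hcons, List.drop_drop]
      simp
    · have hieq : i = cs.length := by omega
      rw [sn_loop]
      simp [hieq, specL, g3]

theorem alt_eq (cs : List Char) :
    sn_loop cs (cs.length : Int) [] 0 = (specL cs).map String.ofList := by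
  have := loopB cs cs.length 0 (by omega) (by omega) []
  simpa using this

set_option maxRecDepth 2000 in
theorem loopA (ys : List Char) (l : List Char) (gs : List (List (List Char))) (d : Nat)
    (h : ys.length ≤ d + 3 * l.length) :
    (l.foldl (fun (st : List (List (List Char)) × Int) _ =>
      match PySem.List.pyGet? ys st.2, PySem.List.pyGet? ys (st.2 + 1), PySem.List.pyGet? ys (st.2 + 2) with
      | some a, some b, some c => (st.1 ++ [[[a, b, c]]], st.2 + 3)
      | some a, some b, none   => (st.1 ++ [[[a, b]]], st.2 + 3)
      | some a, none,   _      => (st.1 ++ [[[a]]], st.2 + 3)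
      | none,   _,      _      => (st.1, st.2 + 3)) (gs, (d : Int))).1
    = gs ++ (g3 (ys.drop d)).map (fun c => [c]) := by
  induction l generalizing gs d with
  | nil =>
    have : ys.drop d = [] := List.drop_eq_nil_of_le (by simpa using h)
    simp [this, g3]
  | cons hd tl ih =>
    have h1 : PySem.List.pyGet? ys (d : Int) = (ys.drop d)[0]? := by
      rw [PySem.List.pyGet?_natCast]
      simp [List.getElem?_drop]
    have h2 : PySem.List.pyGet? ys ((d : Int) + 1) = (ys.drop d)[1]? := by
      rw [show ((d : Int) + 1) = ((d + 1 : Nat) : Int) by push_cast; ring,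
        PySem.List.pyGet?_natCast]
      simp [List.getElem?_drop]
    have h3 : PySem.List.pyGet? ys ((d : Int) + 2) = (ys.drop d)[2]? := by
      rw [show ((d : Int) + 2) = ((d + 2 : Nat) : Int) by push_cast; ring,
        PySem.List.pyGet?_natCast]
      simp [List.getElem?_drop]
    have hcast : ((d : Int) + 3) = ((d + 3 : Nat) : Int) := by push_cast; ring
    have hdrop : ys.drop (d + 3) = (ys.drop d).drop 3 := by
      rw [List.drop_drop]
    have hlen : ys.length ≤ (d + 3) + 3 * tl.length := by
      simp at h; omega
    rw [List.foldl_cons]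
    rcases hm : ys.drop d with _ | ⟨a, _ | ⟨b, _ | ⟨c, t⟩⟩⟩
    · have IH := ih gs (d + 3) hlen
      rw [hdrop, hm] at IH
      have e0 : ([] : List Char)[0]? = none := rfl
      have e1 : ([] : List Char)[1]? = none := rfl
      have e2 : ([] : List Char)[2]? = none := rfl
      simp only [h1, h2, h3, hm, e0, e1, e2]
      rw [hcast, IH]
      simp [g3]
    · have IH := ih (gs ++ [[[a]]]) (d + 3) hlen
      rw [hdrop, hm] at IH
      have e0 : [a][0]? = some a := rfl
      have e1 : [a][1]? = none := rfl
      have e2 : [a][2]? = none := rfl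
      simp only [h1, h2, h3, hm, e0, e1, e2]
      rw [hcast, IH]
      simp [g3]
    · have IH := ih (gs ++ [[[a, b]]]) (d + 3) hlen
      rw [hdrop, hm] at IH
      have e0 : [a, b][0]? = some a := rfl
      have e1 : [a, b][1]? = some b := rfl
      have e2 : [a, b][2]? = none := rfl
      simp only [h1, h2, h3, hm, e0, e1, e2]
      rw [hcast, IH]
      simp [g3]
    · have IH := ih (gs ++ [[[a, b, c]]]) (d + 3) hlen
      rw [hdrop, hm] at IH
      have e0 : (a :: b :: c :: t)[0]? = some a := rfl
      have e1 : (a :: b :: c :: t)[1]? = some b := rfl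
      have e2 : (a :: b :: c :: t)[2]? = some c := rfl
      simp only [h1, h2, h3, hm, e0, e1, e2]
      rw [hcast, IH]
      simp [g3]

theorem a_eq (number : String) : splitNumber number = (specL number.toList).map String.ofList := by
  unfold splitNumber
  dsimp only
  have hloop := loopA number.toList.reverse number.toList.reverse [] 0 (by omega)
  push_cast at hloop
  rw [List.drop_zero, List.nil_append] at hloop
  rw [hloop]
  simp only [PySem.List.foldl_append_singleton_eq_map, 
    List.map_map, List.nil_append]
  unfold specL
  simp [List.map_reverse, List.map_map, Function.comp]

-- ===== VERDICT (by name: the statement is the Claim_ definition above) =====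
theorem splitNumber_spec : Claim_equal_splitNumber := by
  intro number _
  unfold Spec_splitNumber splitNumber_alt
  rw [a_eq, alt_eq]
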